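-- pv_equiv track=rewrite | github.com/vonssy/FastsetWallet-BOT | bot.py | polymod
-- ===== SOURCE A (Python) =====
-- def polymod(values):
--     gens = [0x3b6a57b2, 0x26508e6d, 0x1ea119fa, 0x3d4233dd, 0x2a1462b3]
--     chk = 1
--     for v in values:
--         b = (chk >> 25) & 0xff
--         chk = ((chk & 0x1ffffff) << 5) ^ v
--         for i in range(5):
--             if ((b >> i) & 1):
--                 chk ^= gens[i]
--     return chk
-- ===== SOURCE B (Python) =====
-- # Bech32 checksum as actual GF(32) polynomial arithmetic: the step subtracts
-- # top * g(x), where each coefficient product is computed by carry-less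
-- # (Russian-peasant) multiplication in GF(2^5) mod x^5 + x^3 + 1, instead of
-- # XOR-selecting precomputed generator constants per bit of the top symbol.
--
-- _G = 0x3b6a57b2  # the six 5-bit coefficients of the generator polynomial g(x)
--
--
-- def _gf32_mul(a, b):
--     # multiply two GF(32) elements, reducing with x^5 = x^3 + 1 (0x29)
--     r = 0
--     for _ in range(5):
--         if b & 1:
--             r ^= a
--         b >>= 1
--         a <<= 1
--         if a & 32:
--             a ^= 0x29
--     return r
--
--
-- def polymod(values):
--     chk = 1
--     for v in values:
--         top = (chk >> 25) & 31
--         chk = ((chk & 0x1ffffff) << 5) ^ v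
--         for pos in range(6):
--             coeff = (_G >> (5 * pos)) & 31
--             chk ^= _gf32_mul(top, coeff) << (5 * pos)
--     return chk
-- ===== Notes on version B (the rewrite author's own statement) =====
-- stated objective: alternative
-- what changed: Reinterprets the checksum as GF(32) polynomial arithmetic: instead of XOR-selecting five precomputed generator constants by the bits of the top symbol, B multiplies the top symbol by each 5-bit coefficient of the single generator polynomial with a carry-less Russian-peasant multiplication in GF(2^5) mod x^5+x^3+1 and shifts the products into place.
import Mathlib
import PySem

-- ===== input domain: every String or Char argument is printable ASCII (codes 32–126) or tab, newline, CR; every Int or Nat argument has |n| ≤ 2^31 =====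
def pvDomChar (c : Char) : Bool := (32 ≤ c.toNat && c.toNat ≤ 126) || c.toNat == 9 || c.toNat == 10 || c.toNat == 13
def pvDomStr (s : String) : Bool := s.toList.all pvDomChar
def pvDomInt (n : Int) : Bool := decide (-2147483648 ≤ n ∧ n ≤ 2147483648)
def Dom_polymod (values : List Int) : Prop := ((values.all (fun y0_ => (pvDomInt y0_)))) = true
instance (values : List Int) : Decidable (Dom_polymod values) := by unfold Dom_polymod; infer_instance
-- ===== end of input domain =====

-- B recomputes the step as true GF(32) polynomial arithmetic (carry-less field multiplication of the top symbol by the generator polynomial's coefficients) instead of A's bit-selected XOR of five precomputed constants; alternative algorithm, same values.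


-- ===== PORT A =====
def polymod (values : List Int) : Int :=
  let gens : List Int := [0x3b6a57b2, 0x26508e6d, 0x1ea119fa, 0x3d4233dd, 0x2a1462b3]
  values.foldl (fun chk v =>
    let b := PySem.Int.band (chk >>> 25) 0xff
    let chk' := PySem.Int.bxor ((PySem.Int.band chk 0x1ffffff) <<< 5) v
    (PySem.List.pyRange 0 5 1).foldl (fun c i =>
      if PySem.Int.band (b >>> (i.toNat : Int)) 1 ≠ 0 then
        PySem.Int.bxor c ((PySem.List.pyGet? gens i).getD 0)
      else c) chk') 1

-- ===== PORT B =====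
-- carry-less multiplication in GF(2^5), reducing with x^5 = x^3 + 1 (0x29)
def gf32mul (a b : Int) : Int :=
  (((PySem.List.pyRange 0 5 1).foldl (fun (s : Int × Int × Int) _ =>
    let r := s.1
    let a := s.2.1
    let b := s.2.2
    let r := if PySem.Int.band b 1 ≠ 0 then PySem.Int.bxor r a else r
    let b := b >>> (1 : Int)
    let a := a <<< (1 : Int)
    let a := if PySem.Int.band a 32 ≠ 0 then PySem.Int.bxor a 0x29 else a
    (r, a, b)) (0, a, b))).1

def polymod_alt (values : List Int) : Int :=
  values.foldl (fun chk v =>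
    let top := PySem.Int.band (chk >>> 25) 31
    let chk1 := PySem.Int.bxor ((PySem.Int.band chk 0x1ffffff) <<< 5) v
    (PySem.List.pyRange 0 6 1).foldl (fun c pos =>
      let coeff := PySem.Int.band ((0x3b6a57b2 : Int) >>> (5 * pos)) 31
      PySem.Int.bxor c ((gf32mul top coeff) <<< (5 * pos))) chk1) 1

-- ===== PRECONDITION & SPEC =====
def Spec_polymod (values : List Int) (out : Int) : Prop := out = polymod_alt values
instance (values : List Int) (out : Int) : Decidable (Spec_polymod values out) := by unfold Spec_polymod; infer_instance

-- ===== CLAIM (what is proved, stated in full; the proofs are below) =====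
def Claim_equal_polymod : Prop := ∀ (values : List Int), Dom_polymod values → Spec_polymod values (polymod values)

-- ===== LEMMAS AND PROOFS =====

-- XOR on Int in the four sign quadrants, and associativity
theorem pv_bxor_nn (x y : Nat) : PySem.Int.bxor ↑x ↑y = ↑(x ^^^ y) := by
  simp [PySem.Int.bxor]

theorem pv_bxor_np (x y : Nat) : PySem.Int.bxor ↑x (-↑y - 1) = -↑(x ^^^ y) - 1 := by
  unfold PySem.Int.bxor
  rw [if_pos (by positivity), if_neg (by omega)]
  have h2 : (-(-(y:Int) - 1) - 1).toNat = y := by omega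
  rw [h2, Int.toNat_natCast]

theorem pv_bxor_pn (x y : Nat) : PySem.Int.bxor (-↑x - 1) ↑y = -↑(x ^^^ y) - 1 := by
  unfold PySem.Int.bxor
  rw [if_neg (by omega), if_pos (by positivity)]
  have h2 : (-(-(x:Int) - 1) - 1).toNat = x := by omega
  rw [h2, Int.toNat_natCast]

theorem pv_bxor_nnn (x y : Nat) : PySem.Int.bxor (-↑x - 1) (-↑y - 1) = ↑(x ^^^ y) := by
  unfold PySem.Int.bxor
  rw [if_neg (by omega), if_neg (by omega)]
  have h2 : (-(-(x:Int) - 1) - 1).toNat = x := by omega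
  have h2' : (-(-(y:Int) - 1) - 1).toNat = y := by omega
  rw [h2, h2']

theorem pv_bxor_assoc (a b c : Int) :
    PySem.Int.bxor (PySem.Int.bxor a b) c = PySem.Int.bxor a (PySem.Int.bxor b c) := by
  have dec : ∀ x : Int, (∃ m : Nat, x = ↑m) ∨ (∃ m : Nat, x = -↑m - 1) := by
    intro x
    rcases Int.lt_or_le x 0 with h | h
    · exact Or.inr ⟨(-x - 1).toNat, by omega⟩
    · exact Or.inl ⟨x.toNat, by omega⟩
  rcases dec a with ⟨x, rfl⟩ | ⟨x, rfl⟩ <;> rcases dec b with ⟨y, rfl⟩ | ⟨y, rfl⟩ <;>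
    rcases dec c with ⟨z, rfl⟩ | ⟨z, rfl⟩ <;>
    simp only [pv_bxor_nn, pv_bxor_np, pv_bxor_pn, pv_bxor_nnn, Nat.xor_assoc]

-- masking with an all-ones constant is taking the (Euclidean) remainder
theorem pv_band255 (t : Int) : PySem.Int.band t 255 = t % 256 := by
  have hmod : ∀ m : Nat, m &&& 255 = m % 256 := fun m => by
    have := Nat.and_two_pow_sub_one_eq_mod m 8; norm_num at this; omega
  unfold PySem.Int.band
  rcases Int.lt_or_le t 0 with h | h
  · rw [if_neg (by omega), if_pos (by norm_num),
      show ((255:Int)).toNat = 255 from rfl, Nat.and_comm, hmod]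
    omega
  · rw [if_pos h, if_pos (by norm_num), show ((255:Int)).toNat = 255 from rfl, hmod]
    omega

theorem pv_band31 (t : Int) : PySem.Int.band t 31 = t % 32 := by
  have hmod : ∀ m : Nat, m &&& 31 = m % 32 := fun m => by
    have := Nat.and_two_pow_sub_one_eq_mod m 5; norm_num at this; omega
  unfold PySem.Int.band
  rcases Int.lt_or_le t 0 with h | h
  · rw [if_neg (by omega), if_pos (by norm_num),
      show ((31:Int)).toNat = 31 from rfl, Nat.and_comm, hmod]
    omega
  · rw [if_pos h, if_pos (by norm_num), show ((31:Int)).toNat = 31 from rfl, hmod]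
    omega

-- A's inner loop body as a named function (definitionally the lambda in the port)
def pvGens : List Int := [0x3b6a57b2, 0x26508e6d, 0x1ea119fa, 0x3d4233dd, 0x2a1462b3]

def pvF (b c i : Int) : Int :=
  if PySem.Int.band (b >>> (i.toNat : Int)) 1 ≠ 0 then
    PySem.Int.bxor c ((PySem.List.pyGet? pvGens i).getD 0)
  else c

-- B's inner loop body as a named function (definitionally the lambda in the port)
def pvG (b c pos : Int) : Int :=
  let coeff := PySem.Int.band ((0x3b6a57b2 : Int) >>> (5 * pos)) 31
  PySem.Int.bxor c ((gf32mul b coeff) <<< (5 * pos))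

-- hoisting an initial XOR out of a fold whose step commutes with XOR on the left
theorem pv_hoist {f : Int → Int → Int}
    (hf : ∀ c x i, f (PySem.Int.bxor c x) i = PySem.Int.bxor c (f x i)) (l : List Int) :
    ∀ (x c : Int), List.foldl f (PySem.Int.bxor c x) l
      = PySem.Int.bxor c (List.foldl f x l) := by
  induction l with
  | nil => intro x c; rfl
  | cons i l ih =>
    intro x c
    simp only [List.foldl_cons]
    rw [hf, ih]

theorem pv_hoistF (b : Int) : ∀ (c x i : Int),
    pvF b (PySem.Int.bxor c x) i = PySem.Int.bxor c (pvF b x i) := by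
  intro c x i
  unfold pvF
  split_ifs
  · exact pv_bxor_assoc c x _
  · rfl

theorem pv_hoistG (b : Int) : ∀ (c x pos : Int),
    pvG b (PySem.Int.bxor c x) pos = PySem.Int.bxor c (pvG b x pos) := by
  intro c x pos
  unfold pvG
  exact pv_bxor_assoc c x _

-- for every possible top byte, A's generator fold (from 0) equals B's
-- GF(32)-multiplication fold (from 0) on the low five bits
set_option maxRecDepth 16384 in
theorem pv_gf_ok : ∀ n : Nat, n < 256 →
    List.foldl (pvF ↑n) 0 (PySem.List.pyRange 0 5 1)
      = List.foldl (pvG ↑(n % 32)) 0 (PySem.List.pyRange 0 6 1) := by decide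

theorem pv_step (chk v : Int) :
    (PySem.List.pyRange 0 5 1).foldl
      (fun c i =>
        if PySem.Int.band ((PySem.Int.band (chk >>> 25) 0xff) >>> (i.toNat : Int)) 1 ≠ 0 then
          PySem.Int.bxor c ((PySem.List.pyGet?
            ([0x3b6a57b2, 0x26508e6d, 0x1ea119fa, 0x3d4233dd, 0x2a1462b3] : List Int) i).getD 0)
        else c)
      (PySem.Int.bxor ((PySem.Int.band chk 0x1ffffff) <<< 5) v)
    = (PySem.List.pyRange 0 6 1).foldl
        (fun c pos =>
          let coeff := PySem.Int.band ((0x3b6a57b2 : Int) >>> (5 * pos)) 31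
          PySem.Int.bxor c ((gf32mul (PySem.Int.band (chk >>> 25) 31) coeff) <<< (5 * pos)))
        (PySem.Int.bxor ((PySem.Int.band chk 0x1ffffff) <<< 5) v) := by
  obtain ⟨n, hn, hlt⟩ : ∃ n : Nat, (chk >>> 25) % 256 = ↑n ∧ n < 256 :=
    ⟨((chk >>> 25) % 256).toNat, by omega, by omega⟩
  have h255 : PySem.Int.band (chk >>> 25) 255 = ↑n := by rw [pv_band255, hn]
  have h31 : PySem.Int.band (chk >>> 25) 31 = ↑(n % 32) := by rw [pv_band31]; omega
  have hfA : (fun (c i : Int) =>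
      if PySem.Int.band ((PySem.Int.band (chk >>> 25) 0xff) >>> (i.toNat : Int)) 1 ≠ 0 then
        PySem.Int.bxor c ((PySem.List.pyGet?
          ([0x3b6a57b2, 0x26508e6d, 0x1ea119fa, 0x3d4233dd, 0x2a1462b3] : List Int) i).getD 0)
      else c) = pvF (PySem.Int.band (chk >>> 25) 0xff) := by
    funext c i; simp only [pvF, pvGens]
  have hfB : (fun (c pos : Int) =>
      let coeff := PySem.Int.band ((0x3b6a57b2 : Int) >>> (5 * pos)) 31
      PySem.Int.bxor c ((gf32mul (PySem.Int.band (chk >>> 25) 31) coeff) <<< (5 * pos)))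
      = pvG (PySem.Int.band (chk >>> 25) 31) := by
    funext c pos; simp only [pvG]
  rw [hfA, hfB, h255, h31]
  set X := PySem.Int.bxor ((PySem.Int.band chk 0x1ffffff) <<< 5) v with hX
  calc List.foldl (pvF ↑n) X (PySem.List.pyRange 0 5 1)
      = List.foldl (pvF ↑n) (PySem.Int.bxor X 0) (PySem.List.pyRange 0 5 1) := by
        rw [PySem.Int.bxor_zero]
    _ = PySem.Int.bxor X (List.foldl (pvF ↑n) 0 (PySem.List.pyRange 0 5 1)) :=
        pv_hoist (pv_hoistF ↑n) _ _ _
    _ = PySem.Int.bxor X (List.foldl (pvG ↑(n % 32)) 0 (PySem.List.pyRange 0 6 1)) := by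
        rw [pv_gf_ok n hlt]
    _ = List.foldl (pvG ↑(n % 32)) (PySem.Int.bxor X 0) (PySem.List.pyRange 0 6 1) :=
        (pv_hoist (pv_hoistG _) _ _ _).symm
    _ = _ := by rw [PySem.Int.bxor_zero]

theorem pv_foldl_ext {α β : Type} (f g : α → β → α) (h : ∀ a x, f a x = g a x) :
    ∀ (l : List β) (a : α), List.foldl f a l = List.foldl g a l := by
  have : f = g := funext fun a => funext (h a)
  intro l a; rw [this]

-- ===== VERDICT (by name: the statement is the Claim_ definition above) =====
theorem polymod_spec : Claim_equal_polymod := by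
  intro values _
  show polymod values = polymod_alt values
  unfold polymod polymod_alt
  exact pv_foldl_ext _ _ (fun chk v => pv_step chk v) values 1
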